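-- pv_equiv track=rewrite | github.com/Mohgar/ITI_python | lab3.py | largest_smallest_difference
-- ===== SOURCE A (Python) =====
-- def largest_smallest_difference(num:int):
--     if not isinstance(num, int):
--         raise TypeError("The parameter should be an integer")
--     if num < 10 :
--         raise ValueError("The number should be at least two digits")
--
--     digits = [digit for digit in str(num)]
--     max_num_list = sorted(digits, reverse= True)
--     max_num = int("".join(max_num_list))
--     min_num_list  = sorted(digits)
--     min_num = int("".join(min_num_list))
--     return max_num-min_num
-- ===== SOURCE B (Python) =====
-- def largest_smallest_difference(num: int):
--     if not isinstance(num, int):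
--         raise TypeError("The parameter should be an integer")
--     if num < 10:
--         raise ValueError("The number should be at least two digits")
--
--     digits = list(str(num))
--     max_num = int("".join(d * digits.count(d) for d in "9876543210"))
--     min_num = int("".join(d * digits.count(d) for d in "0123456789"))
--     return max_num - min_num
-- ===== Notes on version B (the rewrite author's own statement) =====
-- stated objective: alternative
-- what changed: Replaces the two comparison sorts of the digit list by a counting-sort construction: each digit's multiplicity is counted and the max/min strings are built by a fixed 9-to-0 / 0-to-9 digit traversal.
import Mathlib
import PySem

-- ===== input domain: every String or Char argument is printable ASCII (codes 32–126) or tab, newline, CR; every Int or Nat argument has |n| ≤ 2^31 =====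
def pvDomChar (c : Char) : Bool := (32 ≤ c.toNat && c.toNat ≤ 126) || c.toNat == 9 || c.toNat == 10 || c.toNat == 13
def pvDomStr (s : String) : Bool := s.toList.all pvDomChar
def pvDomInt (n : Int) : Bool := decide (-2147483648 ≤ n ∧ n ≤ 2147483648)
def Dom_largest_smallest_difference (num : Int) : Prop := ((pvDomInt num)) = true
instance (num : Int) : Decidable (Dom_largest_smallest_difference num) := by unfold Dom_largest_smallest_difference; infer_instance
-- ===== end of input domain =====

-- B replaces A's two comparison sorts with a counting-sort construction over the fixed digit alphabet (objective: alternative).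

-- ===== PORT A =====
def largest_smallest_difference (num : Int) : Int :=
  let digits := PySem.Int.toChars num
  let max_num_list := PySem.List.sorted digits (fun c => c) true
  let max_num := (PySem.Int.ofChars? max_num_list).getD 0   -- int(...) never raises here: digits of a number
  let min_num_list := PySem.List.sorted digits (fun c => c) false
  let min_num := (PySem.Int.ofChars? min_num_list).getD 0
  max_num - min_num

-- ===== PORT B =====
def pvDigitsDesc : List Char := ['9','8','7','6','5','4','3','2','1','0']
def pvDigitsAsc : List Char := ['0','1','2','3','4','5','6','7','8','9']

def largest_smallest_difference_alt (num : Int) : Int :=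
  let digits := PySem.Int.toChars num
  let max_num := (PySem.Int.ofChars? (pvDigitsDesc.flatMap (fun d => List.replicate (digits.count d) d))).getD 0
  let min_num := (PySem.Int.ofChars? (pvDigitsAsc.flatMap (fun d => List.replicate (digits.count d) d))).getD 0
  max_num - min_num

-- ===== PRECONDITION & SPEC =====
-- Pre_: A raises TypeError/ValueError for num < 10 (B raises identically there).
def Pre_largest_smallest_difference (num : Int) : Prop := 10 ≤ num
instance (num : Int) : Decidable (Pre_largest_smallest_difference num) := by unfold Pre_largest_smallest_difference; infer_instance
def pvWitness_largest_smallest_difference : Int := 907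

def Spec_largest_smallest_difference (num : Int) (out : Int) : Prop := out = largest_smallest_difference_alt num
instance (num : Int) (out : Int) : Decidable (Spec_largest_smallest_difference num out) := by unfold Spec_largest_smallest_difference; infer_instance

-- ===== CLAIM (what is proved, stated in full; the proofs are below) =====
def Claim_equal_largest_smallest_difference : Prop := ∀ (num : Int), Dom_largest_smallest_difference num → Pre_largest_smallest_difference num → Spec_largest_smallest_difference num (largest_smallest_difference num)

-- ===== LEMMAS AND PROOFS =====

-- every character produced by Nat.toDigitsCore over base 10 is a decimal digit
theorem pv_mem_toDigitsCore (f : Nat) : ∀ (n : Nat) (l : List Char),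
    (∀ c ∈ l, c ∈ pvDigitsAsc) → ∀ c ∈ Nat.toDigitsCore 10 f n l, c ∈ pvDigitsAsc := by
  induction f with
  | zero => intro n l hl; simpa [Nat.toDigitsCore] using hl
  | succ f ih =>
    intro n l hl
    have hdig : Nat.digitChar (n % 10) ∈ pvDigitsAsc := by
      have hm : n % 10 < 10 := Nat.mod_lt _ (by norm_num)
      interval_cases h : n % 10 <;> decide
    simp only [Nat.toDigitsCore]
    split
    · intro c hc
      rcases List.mem_cons.mp hc with rfl | hc
      · exact hdig
      · exact hl c hc
    · exact ih (n / 10) _ (by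
        intro c hc
        rcases List.mem_cons.mp hc with rfl | hc
        · exact hdig
        · exact hl c hc)

theorem pv_mem_digits {num : Int} (h : 10 ≤ num) :
    ∀ c ∈ PySem.Int.toChars num, c ∈ pvDigitsAsc := by
  have hneg : ¬ num < 0 := by omega
  simp only [PySem.Int.toChars, hneg, if_false]
  exact pv_mem_toDigitsCore _ _ [] (by simp)

-- B's counting construction is a permutation of the digit list
theorem pv_perm_flatMap (ds : List Char) (xs : List Char)
    (hnd : ds.Nodup) (hcov : ∀ c ∈ xs, c ∈ ds) :
    (ds.flatMap (fun d => List.replicate (xs.count d) d)).Perm xs := by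
  rw [List.perm_iff_count]
  intro a
  rw [List.count_flatMap]
  by_cases ha : a ∈ ds
  · obtain ⟨l1, l2, rfl⟩ := List.mem_iff_append.mp ha
    have hnd' := hnd
    rw [List.nodup_append] at hnd'
    rw [List.map_append, List.sum_append, List.map_cons, List.sum_cons]
    have h1 : ∀ d ∈ l1, (List.replicate (xs.count d) d).count a = 0 := by
      intro d hd
      have hne : d ≠ a := hnd'.2.2 d hd a List.mem_cons_self
      simp [List.count_replicate, hne]
    have h2 : ∀ d ∈ l2, (List.replicate (xs.count d) d).count a = 0 := by
      intro d hd
      have hne : a ≠ d := fun h => (List.nodup_cons.mp hnd'.2.1).1 (h ▸ hd)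
      simp [List.count_replicate, hne.symm]
    rw [List.sum_eq_zero (by simpa using h1), List.sum_eq_zero (by simpa using h2)]
    simp
  · have hx : xs.count a = 0 := by
      rw [List.count_eq_zero]
      intro hmem; exact ha (hcov a hmem)
    rw [hx]
    apply List.sum_eq_zero
    intro x hx'
    simp only [List.mem_map] at hx'
    obtain ⟨d, hd, rfl⟩ := hx'
    have hne : a ≠ d := fun h => ha (h ▸ hd)
    simp [List.count_replicate, hne.symm]

-- B's counting construction is ordered whenever the digit alphabet is
theorem pv_pairwise_flatMap (R : Char → Char → Prop) (ds : List Char) (f : Char → Nat)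
    (hrefl : ∀ d ∈ ds, R d d) (hd : ds.Pairwise R) :
    (ds.flatMap (fun d => List.replicate (f d) d)).Pairwise R := by
  induction ds with
  | nil => simp
  | cons d ds ih =>
    simp only [List.flatMap_cons]
    rw [List.pairwise_append]
    refine ⟨?_, ih (fun x hx => hrefl x (List.mem_cons_of_mem _ hx)) hd.tail, ?_⟩
    · exact List.pairwise_replicate.mpr (Or.inr (hrefl d List.mem_cons_self))
    · intro a ha b hb
      have ha' : a = d := List.eq_of_mem_replicate ha
      obtain ⟨d', hd', hb'⟩ := List.mem_flatMap.mp hb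
      have hb'' : b = d' := List.eq_of_mem_replicate hb'
      subst ha'; subst hb''
      exact (List.pairwise_cons.mp hd).1 _ hd'

theorem pv_asc_eq {num : Int} (h : 10 ≤ num) :
    PySem.List.sorted (PySem.Int.toChars num) (fun c => c) false
      = pvDigitsAsc.flatMap (fun d => List.replicate ((PySem.Int.toChars num).count d) d) := by
  apply PySem.List.sorted_id_eq_of_perm_of_pairwise
  · exact pv_perm_flatMap _ _ (by decide) (pv_mem_digits h)
  · exact pv_pairwise_flatMap _ _ _ (fun d _ => le_refl d) (by decide)

theorem pv_desc_eq {num : Int} (h : 10 ≤ num) :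
    PySem.List.sorted (PySem.Int.toChars num) (fun c => c) true
      = pvDigitsDesc.flatMap (fun d => List.replicate ((PySem.Int.toChars num).count d) d) := by
  apply PySem.List.eq_of_perm_of_pairwise_le_of_injective (fun c : Char => -(c.toNat : Int))
  · intro a b hab
    simp only [neg_inj, Int.natCast_inj, Char.toNat] at hab
    exact Char.ext (UInt32.toNat_inj.mp hab)
  · refine (PySem.List.sorted_perm _ _ _).trans
      (pv_perm_flatMap _ _ (by decide) ?_).symm
    intro c hc
    have hm := pv_mem_digits h c hc
    fin_cases hm <;> decide
  · refine (PySem.List.sorted_pairwise_rev _ _).imp ?_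
    intro a b hab
    simp only [neg_le_neg_iff]
    rw [Char.le_def] at hab
    exact Nat.cast_le.mpr (UInt32.le_iff_toNat_le.mp hab)
  · exact pv_pairwise_flatMap _ _ _ (fun d _ => le_refl _) (by decide)

-- ===== VERDICT (by name: the statement is the Claim_ definition above) =====
theorem largest_smallest_difference_spec : Claim_equal_largest_smallest_difference := by
  intro num _ hpre
  unfold Spec_largest_smallest_difference largest_smallest_difference largest_smallest_difference_alt
  simp only [pv_asc_eq hpre, pv_desc_eq hpre]
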